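-- pv_equiv track=rewrite | github.com/AlgoCraftt/Algovibe | backend/app/rag/prompts.py | format_docs_context
-- ===== SOURCE A (Python) =====
-- def format_docs_context(docs: list[str], doc_type: str = "Documentation") -> str:
--     """
--     Format documentation chunks for inclusion in prompt.
--
--     Args:
--         docs: List of documentation strings
--         doc_type: Type label for the documentation
--
--     Returns:
--         Formatted documentation section
--     """
--
--     if not docs:
--         return f"## {doc_type} Reference\nNo additional documentation available."
--
--     # Limit total context size
--     max_chars = 4000
--     selected_docs = []
--     current_chars = 0
--
--     for doc in docs:
--         if current_chars + len(doc) > max_chars: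
--             break
--         selected_docs.append(doc)
--         current_chars += len(doc)
--
--     docs_text = "\n\n---\n\n".join(selected_docs)
--
--     return f"""## {doc_type} Reference
--
-- Use the following documentation as reference. Follow these patterns and best practices:
--
-- {docs_text}"""
-- ===== SOURCE B (Python) =====
-- def format_docs_context(docs: list[str], doc_type: str = "Documentation") -> str:
--     """Prefix-sum based selection: build cumulative lengths in one pass, count
--     how many totals stay within the limit (the totals are nondecreasing, so the
--     count equals the length of the leading run), and slice."""
--
--     if not docs:
--         return f"## {doc_type} Reference\nNo additional documentation available."
--
--     total = 0
--     prefix = [total := total + len(d) for d in docs]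
--     k = sum(t <= 4000 for t in prefix)
--
--     docs_text = "\n\n---\n\n".join(docs[:k])
--
--     return f"""## {doc_type} Reference
--
-- Use the following documentation as reference. Follow these patterns and best practices:
--
-- {docs_text}"""
-- ===== Notes on version B (the rewrite author's own statement) =====
-- stated objective: alternative
-- what changed: Replaced the running-sum loop with break by a prefix-sum pass followed by a monotone count of totals within the 4000-char limit and a slice of the first k docs.
import Mathlib
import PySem

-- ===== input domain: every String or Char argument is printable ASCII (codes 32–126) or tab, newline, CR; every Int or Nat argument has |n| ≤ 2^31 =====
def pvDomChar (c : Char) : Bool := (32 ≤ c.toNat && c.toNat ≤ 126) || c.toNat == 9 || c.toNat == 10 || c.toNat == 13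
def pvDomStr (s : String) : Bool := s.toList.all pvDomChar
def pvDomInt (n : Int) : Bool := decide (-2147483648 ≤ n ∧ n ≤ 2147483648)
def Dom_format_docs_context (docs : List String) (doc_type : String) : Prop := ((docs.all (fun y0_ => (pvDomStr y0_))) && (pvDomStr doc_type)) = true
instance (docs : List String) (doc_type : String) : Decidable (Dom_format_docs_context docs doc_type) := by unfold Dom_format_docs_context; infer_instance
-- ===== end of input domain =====

-- B replaces A's running-sum loop with break by a prefix-sum pass, a monotone count of totals ≤ 4000, and a slice (alternative decomposition, same cost).


-- ===== PORT A =====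
-- the 'for doc in docs: … break' loop, with Python's selected/current_chars state
def pvALoop : List String → Int → List String → List String
  | [], _, sel => sel
  | d :: rest, cur, sel =>
    if cur + PySem.Str.len d > 4000 then sel
    else pvALoop rest (cur + PySem.Str.len d) (sel ++ [d])

def format_docs_context (docs : List String) (doc_type : String) : String :=
  if docs = [] then
    "## " ++ doc_type ++ " Reference\nNo additional documentation available."
  else
    let selected_docs := pvALoop docs 0 []
    let docs_text := PySem.Str.join "\n\n---\n\n" selected_docs
    "## " ++ doc_type ++ " Reference\n\nUse the following documentation as reference. Follow these patterns and best practices:\n\n" ++ docs_text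

-- ===== PORT B =====
-- 'prefix = [total := total + len(d) for d in docs]' : one fold carrying (total, prefix)
def pvPrefixSums (docs : List String) : List Int :=
  (docs.foldl (fun (st : Int × List Int) d =>
      (st.1 + PySem.Str.len d, st.2 ++ [st.1 + PySem.Str.len d])) (0, [])).2

def format_docs_context_alt (docs : List String) (doc_type : String) : String :=
  if docs = [] then
    "## " ++ doc_type ++ " Reference\nNo additional documentation available."
  else
    let prefixList := pvPrefixSums docs
    let k := (prefixList.filter (fun t => t ≤ 4000)).length
    let docs_text := PySem.Str.join "\n\n---\n\n" (docs.take k)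
    "## " ++ doc_type ++ " Reference\n\nUse the following documentation as reference. Follow these patterns and best practices:\n\n" ++ docs_text

-- ===== PRECONDITION & SPEC =====
def Spec_format_docs_context (docs : List String) (doc_type : String) (out : String) : Prop := out = format_docs_context_alt docs doc_type
instance (docs : List String) (doc_type : String) (out : String) : Decidable (Spec_format_docs_context docs doc_type out) := by unfold Spec_format_docs_context; infer_instance

-- ===== CLAIM (what is proved, stated in full; the proofs are below) =====
def Claim_equal_format_docs_context : Prop := ∀ (docs : List String) (doc_type : String), Dom_format_docs_context docs doc_type → Spec_format_docs_context docs doc_type (format_docs_context docs doc_type)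

-- ===== LEMMAS AND PROOFS =====

-- proof-side characterisation of where A's loop stops
def pvCnt : List String → Int → Nat
  | [], _ => 0
  | d :: rest, cur => if cur + PySem.Str.len d > 4000 then 0 else 1 + pvCnt rest (cur + PySem.Str.len d)

-- proof-side prefix sums starting at an offset
def pvPref : Int → List String → List Int
  | _, [] => []
  | cur, d :: rest => (cur + PySem.Str.len d) :: pvPref (cur + PySem.Str.len d) rest

theorem pvALoop_eq_take (docs : List String) : ∀ (cur : Int) (sel : List String),
    pvALoop docs cur sel = sel ++ docs.take (pvCnt docs cur) := by
  induction docs with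
  | nil => intro cur sel; simp [pvALoop, pvCnt]
  | cons d rest ih =>
    intro cur sel
    by_cases h : cur + (d.length : Int) > 4000
    · simp [pvALoop, pvCnt, h]
    · simp [pvALoop, pvCnt, h, ih, Nat.one_add]

theorem pvFoldl_eq_pvPref (docs : List String) : ∀ (cur : Int) (acc : List Int),
    (docs.foldl (fun (st : Int × List Int) d =>
      (st.1 + PySem.Str.len d, st.2 ++ [st.1 + PySem.Str.len d])) (cur, acc)).2
      = acc ++ pvPref cur docs := by
  induction docs with
  | nil => intro cur acc; simp [pvPref]
  | cons d rest ih =>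
    intro cur acc
    simp only [List.foldl_cons]
    rw [ih]
    simp [pvPref]

theorem pvPref_le (docs : List String) : ∀ (cur : Int) (x : Int), x ∈ pvPref cur docs → cur ≤ x := by
  induction docs with
  | nil => intro cur x hx; simp [pvPref] at hx
  | cons d rest ih =>
    intro cur x hx
    have hlen : (0:Int) ≤ PySem.Str.len d := by
      simp [PySem.Str.len_eq]
    simp [pvPref] at hx
    rcases hx with h | h
    · omega
    · have := ih (cur + PySem.Str.len d) x h; omega

theorem pvFilter_len_eq_cnt (docs : List String) : ∀ (cur : Int),
    ((pvPref cur docs).filter (fun t => t ≤ 4000)).length = pvCnt docs cur := by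
  induction docs with
  | nil => intro cur; simp [pvPref, pvCnt]
  | cons d rest ih =>
    intro cur
    by_cases h : cur + (d.length : Int) > 4000
    · have hnil : (pvPref (cur + PySem.Str.len d) rest).filter (fun t => decide (t ≤ 4000)) = [] := by
        rw [List.filter_eq_nil_iff]
        intro x hx
        have hle := pvPref_le rest (cur + PySem.Str.len d) x hx
        have hsl : PySem.Str.len d = (d.length : Int) := by simp
        rw [hsl] at hle
        simp only [decide_eq_true_eq]
        omega
      have hsl : PySem.Str.len d = (d.length : Int) := by simp
      rw [hsl] at hnil
      have hd : ¬ (cur + (d.length : Int) ≤ 4000) := by omega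
      simp [pvPref, pvCnt, h, hd, hnil]
    · have hd : cur + (d.length : Int) ≤ 4000 := by omega
      simp [pvPref, pvCnt, h, hd, ih, Nat.add_comm]

-- ===== VERDICT (by name: the statement is the Claim_ definition above) =====
theorem format_docs_context_spec : Claim_equal_format_docs_context := by
  intro docs doc_type _
  unfold Spec_format_docs_context format_docs_context format_docs_context_alt
  by_cases hnil : docs = []
  · simp [hnil]
  · simp only [hnil, if_false]
    have h1 : pvALoop docs 0 [] = docs.take (pvCnt docs 0) := by
      simpa using pvALoop_eq_take docs 0 []
    have h2 : pvPrefixSums docs = pvPref 0 docs := by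
      simpa using pvFoldl_eq_pvPref docs 0 []
    rw [h1, h2, pvFilter_len_eq_cnt docs 0]
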